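-- pv_equiv track=rewrite | github.com/roemmele/AbLit | scripts/dataset_creation/evaluate_alignment.py | binarize_alignment_labels
-- ===== SOURCE A (Python) =====
-- def binarize_alignment_labels(alignment):
--
--     paired_nums = set([(orig_num, abridged_num)
--                        for orig_nums, abridged_nums in zip(alignment['original_segment_nums'],
--                                                            alignment['abridged_segment_nums'])
--                        for orig_num in orig_nums
--                        for abridged_num in abridged_nums]
--                       )
--
--     max_orig_seg_num = max([num for nums in alignment['original_segment_nums']
--                             for num in nums])
--     max_abridged_seg_num = max([num for nums in alignment['abridged_segment_nums']
--                                 for num in nums])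
--
--     binary_labels = {}
--     for orig_num in range(max_orig_seg_num + 1):
--         for abridged_num in range(max_abridged_seg_num + 1):
--             binary_labels[(orig_num,
--                            abridged_num)] = (True if (orig_num, abridged_num,) in paired_nums
--                                              else False)
--
--     return binary_labels
-- ===== SOURCE B (Python) =====
-- def binarize_alignment_labels(alignment):
--     orig_rows = alignment['original_segment_nums']
--     abridged_rows = alignment['abridged_segment_nums']
--
--     max_orig = max([num for nums in orig_rows for num in nums])
--     max_abridged = max([num for nums in abridged_rows for num in nums])
--
--     # dense grid with every cell initialized to False
--     binary_labels = {(o, a): False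
--                      for o in range(max_orig + 1)
--                      for a in range(max_abridged + 1)}
--
--     # single scatter pass: mark each aligned grid cell True
--     # (a negative segment number lies outside the grid, so it is skipped)
--     for orig_nums, abridged_nums in zip(orig_rows, abridged_rows):
--         for o in orig_nums:
--             for a in abridged_nums:
--                 if o >= 0 and a >= 0:
--                     binary_labels[(o, a)] = True
--
--     return binary_labels
-- ===== Notes on version B (the rewrite author's own statement) =====
-- stated objective: alternative
-- what changed: B drops A's paired_nums set and the per-cell membership test entirely: it first builds the dense grid with every cell False, then makes one scatter pass over the zipped alignment lists that overwrites each aligned grid cell with True (negative segment numbers lie outside the grid and are skipped).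
import Mathlib
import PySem

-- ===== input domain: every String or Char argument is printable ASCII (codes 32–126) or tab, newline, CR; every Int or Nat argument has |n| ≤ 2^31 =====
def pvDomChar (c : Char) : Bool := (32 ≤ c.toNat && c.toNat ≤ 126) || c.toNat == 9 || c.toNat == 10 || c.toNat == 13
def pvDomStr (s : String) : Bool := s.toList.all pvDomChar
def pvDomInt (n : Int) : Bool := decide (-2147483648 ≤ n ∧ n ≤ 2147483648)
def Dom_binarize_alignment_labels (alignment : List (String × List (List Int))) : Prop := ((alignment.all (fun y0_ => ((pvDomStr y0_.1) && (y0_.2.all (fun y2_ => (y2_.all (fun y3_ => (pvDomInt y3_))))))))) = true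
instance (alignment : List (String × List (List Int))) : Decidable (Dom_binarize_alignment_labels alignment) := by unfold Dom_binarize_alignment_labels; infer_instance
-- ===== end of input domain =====

-- B replaces A's paired-set + per-cell membership test by a False-initialized dense grid
-- followed by one scatter pass that overwrites each aligned grid cell with True.

-- ===== PORT A =====
def binarize_alignment_labels (alignment : List (String × List (List Int))) : List (Int × Int × Bool) :=
  match (PySem.Dict.mk alignment).get? "original_segment_nums",
        (PySem.Dict.mk alignment).get? "abridged_segment_nums" with
  | some orig, some abr =>
    let paired : PySem.Set (Int × Int) :=
      PySem.Set.ofList ((orig.zip abr).flatMap (fun p =>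
        p.1.flatMap (fun o => p.2.map (fun a => (o, a)))))
    match PySem.List.max? (orig.flatMap (fun nums => nums)) (fun x => x),
          PySem.List.max? (abr.flatMap (fun nums => nums)) (fun x => x) with
    | some mo, some ma =>
      ((PySem.List.pyRange 0 (mo + 1) 1).foldl (fun d o =>
        (PySem.List.pyRange 0 (ma + 1) 1).foldl (fun d a =>
          d.insert (o, a) (if paired.contains (o, a) then true else false)) d)
        PySem.Dict.empty).items.map (fun p => (p.1.1, p.1.2, p.2))
    | _, _ => []  -- unreachable under Pre_ (max([]) raises ValueError)
  | _, _ => []    -- unreachable under Pre_ (missing key raises KeyError)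

-- ===== PORT B =====
def binarize_alignment_labels_alt (alignment : List (String × List (List Int))) : List (Int × Int × Bool) :=
  match (PySem.Dict.mk alignment).get? "original_segment_nums" with
  | none => []       -- unreachable under Pre_ (KeyError)
  | some orig =>
    match (PySem.Dict.mk alignment).get? "abridged_segment_nums" with
    | none => []     -- unreachable under Pre_ (KeyError)
    | some abr =>
      match PySem.List.max? (orig.flatMap (fun nums => nums)) (fun x => x) with
      | none => []   -- unreachable under Pre_ (max([]) ValueError)
      | some mo =>
        match PySem.List.max? (abr.flatMap (fun nums => nums)) (fun x => x) with
        | none => [] -- unreachable under Pre_ (max([]) ValueError)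
        | some ma =>
          -- dense grid with every cell initialized to False
          let grid : PySem.Dict (Int × Int) Bool :=
            (PySem.List.pyRange 0 (mo + 1) 1).foldl (fun d o =>
              (PySem.List.pyRange 0 (ma + 1) 1).foldl (fun d a =>
                d.insert (o, a) false) d)
              PySem.Dict.empty
          -- single scatter pass: overwrite each aligned grid cell with True
          ((orig.zip abr).foldl (fun d p =>
            p.1.foldl (fun d o =>
              p.2.foldl (fun d a =>
                if 0 ≤ o ∧ 0 ≤ a then d.insert (o, a) true else d) d) d)
            grid).items.map (fun p => (p.1.1, p.1.2, p.2))

-- ===== PRECONDITION & SPEC =====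
-- Pre_ excludes exactly the inputs on which the Python A raises: a missing
-- 'original_segment_nums'/'abridged_segment_nums' key (KeyError) or an empty
-- flattened list of segment numbers (max([]) raises ValueError).
def Pre_binarize_alignment_labels (alignment : List (String × List (List Int))) : Prop :=
  ((PySem.Dict.mk alignment).getD "original_segment_nums" []).flatMap (fun nums => nums) ≠ [] ∧
  ((PySem.Dict.mk alignment).getD "abridged_segment_nums" []).flatMap (fun nums => nums) ≠ []
instance (alignment : List (String × List (List Int))) : Decidable (Pre_binarize_alignment_labels alignment) := by unfold Pre_binarize_alignment_labels; infer_instance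

def pvWitness_binarize_alignment_labels : (List (String × List (List Int))) :=
  [("original_segment_nums", [[0, 1]]), ("abridged_segment_nums", [[0]])]

def Spec_binarize_alignment_labels (alignment : List (String × List (List Int))) (out : List (Int × Int × Bool)) : Prop := out = binarize_alignment_labels_alt alignment
instance (alignment : List (String × List (List Int))) (out : List (Int × Int × Bool)) : Decidable (Spec_binarize_alignment_labels alignment out) := by unfold Spec_binarize_alignment_labels; infer_instance

-- ===== CLAIM (what is proved, stated in full; the proofs are below) =====
def Claim_equal_binarize_alignment_labels : Prop := ∀ (alignment : List (String × List (List Int))), Dom_binarize_alignment_labels alignment → Pre_binarize_alignment_labels alignment → Spec_binarize_alignment_labels alignment (binarize_alignment_labels alignment)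

-- ===== LEMMAS AND PROOFS =====

-- A nested grid loop of inserts over fresh distinct keys lays items out row by row.
lemma grid_items (as : List Int) (f : Int → Int → Bool) (has : as.Nodup) :
    ∀ (os : List Int) (d : PySem.Dict (Int × Int) Bool), os.Nodup →
      (∀ o ∈ os, ∀ a : Int, d.contains (o, a) = false) →
      (os.foldl (fun d o => as.foldl (fun d a => d.insert (o, a) (f o a)) d) d).items
        = d.items ++ os.flatMap (fun o => as.map (fun a => ((o, a), f o a))) := by
  intro os
  induction os with
  | nil => intro d _ _; simp
  | cons o t ih =>
    intro d hnd hfresh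
    have hone : (as.foldl (fun d a => d.insert (o, a) (f o a)) d).items
        = d.items ++ as.map (fun a => ((o, a), f o a)) :=
      PySem.Dict.items_foldl_insert_fresh as (fun a => (o, a)) (f o) d
        (fun a _ => hfresh o (by simp) a)
        (has.map (fun a b h => by simpa using h))
    have hkeys : (as.foldl (fun d a => d.insert (o, a) (f o a)) d).keys
        = PySem.Set.update d.keys (as.map (fun a => (o, a))) :=
      PySem.Dict.keys_foldl_insert_key as (fun a => (o, a)) (fun d a => f o a) d
    have hfresh' : ∀ o' ∈ t, ∀ a : Int,
        (as.foldl (fun d a => d.insert (o, a) (f o a)) d).contains (o', a) = false := by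
      intro o' ho' a
      have hne : o' ≠ o := by
        rintro rfl; exact (List.nodup_cons.mp hnd).1 ho'
      rw [← Bool.not_eq_true, PySem.Dict.contains_iff_mem_keys, hkeys, PySem.Set.mem_update]
      rintro (hmem | hmem)
      · have := hfresh o' (by simp [ho']) a
        rw [← Bool.not_eq_true, PySem.Dict.contains_iff_mem_keys] at this
        exact this hmem
      · rcases List.mem_map.mp hmem with ⟨a', _, ha'⟩
        exact hne (by simpa using congrArg Prod.fst ha'.symm)
    rw [List.foldl_cons, ih _ (List.nodup_cons.mp hnd).2 hfresh', hone]
    simp [List.flatMap_cons]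

-- B's three nested scatter loops are one fold over the flattened pair list.
lemma scatter_flatten (ps : List (List Int × List Int)) (d : PySem.Dict (Int × Int) Bool) :
    ps.foldl (fun d p =>
      p.1.foldl (fun d o =>
        p.2.foldl (fun d a =>
          if 0 ≤ o ∧ 0 ≤ a then d.insert (o, a) true else d) d) d) d
    = (ps.flatMap (fun p => p.1.flatMap (fun o => p.2.map (fun a => (o, a))))).foldl
        (fun d k => if 0 ≤ k.1 ∧ 0 ≤ k.2 then d.insert k true else d) d := by
  induction ps generalizing d with
  | nil => rfl
  | cons p t ih =>
    simp only [List.foldl_cons, List.flatMap_cons, List.foldl_append, ih]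
    congr 1
    clear ih
    induction p.1 generalizing d with
    | nil => rfl
    | cons o os iho =>
      simp only [List.foldl_cons, List.flatMap_cons, List.foldl_append]
      rw [iho]
      congr 1
      simp [List.foldl_map]

-- Scattering True over keys already present overwrites values in place.
lemma scatter_items (ks : List (Int × Int)) :
    ∀ (d : PySem.Dict (Int × Int) Bool),
      (∀ k ∈ ks, 0 ≤ k.1 ∧ 0 ≤ k.2 → d.contains k = true) →
      (ks.foldl (fun d k => if 0 ≤ k.1 ∧ 0 ≤ k.2 then d.insert k true else d) d).items
        = d.items.map (fun p => if 0 ≤ p.1.1 ∧ 0 ≤ p.1.2 ∧ p.1 ∈ ks then (p.1, true) else p) := by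
  induction ks with
  | nil => intro d _; simp
  | cons k0 t ih =>
    intro d hc
    rw [List.foldl_cons]
    by_cases hok : 0 ≤ k0.1 ∧ 0 ≤ k0.2
    · rw [if_pos hok]
      have hcont : d.contains k0 = true := hc k0 (by simp) hok
      have hrest : ∀ k ∈ t, 0 ≤ k.1 ∧ 0 ≤ k.2 → (d.insert k0 true).contains k = true := by
        intro k hk hkok
        rw [PySem.Dict.contains_insert]
        simp [hc k (by simp [hk]) hkok]
      rw [ih _ hrest]
      simp only [PySem.Dict.items_insert, hcont, if_true, List.map_map]
      apply List.map_congr_left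
      intro p _
      by_cases hpk : p.1 = k0
      · subst hpk
        simp only [BEq.rfl, if_pos, Function.comp]
        simp [hok]
      · have : (p.1 == k0) = false := by simpa using hpk
        simp only [Function.comp, this, Bool.false_eq_true, if_false]
        by_cases hmem : p.1 ∈ t
        · simp [hmem, hpk]
        · simp [hmem, hpk]
    · rw [if_neg hok, ih _ (fun k hk => hc k (by simp [hk]))]
      apply List.map_congr_left
      intro p _
      by_cases hpk : p.1 = k0
      · have : ¬ (0 ≤ p.1.1 ∧ 0 ≤ p.1.2) := by rw [hpk]; exact hok
        simp only [List.mem_cons]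
        rw [if_neg (by tauto), if_neg (by tauto)]
      · simp [hpk]

-- ===== VERDICT (by name: the statement is the Claim_ definition above) =====
theorem binarize_alignment_labels_spec : Claim_equal_binarize_alignment_labels := by
  intro alignment _ hpre
  obtain ⟨h1, h2⟩ := hpre
  rw [PySem.Dict.getD_eq_get?_getD] at h1
  rw [PySem.Dict.getD_eq_get?_getD] at h2
  unfold Spec_binarize_alignment_labels binarize_alignment_labels binarize_alignment_labels_alt
  rcases hg1 : (PySem.Dict.mk alignment).get? "original_segment_nums" with _ | orig
  · rw [hg1] at h1
  rcases hg2 : (PySem.Dict.mk alignment).get? "abridged_segment_nums" with _ | abr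
  · rw [hg2] at h2
  rw [hg1] at h1; rw [hg2] at h2
  simp only [Option.getD_some] at h1 h2
  rcases hm1 : PySem.List.max? (orig.flatMap (fun nums => nums)) (fun x => x) with _ | mo
  · exact absurd ((PySem.List.max?_eq_none_iff _ _).mp hm1) h1
  rcases hm2 : PySem.List.max? (abr.flatMap (fun nums => nums)) (fun x => x) with _ | ma
  · exact absurd ((PySem.List.max?_eq_none_iff _ _).mp hm2) h2
  simp only [hm1, hm2]
  -- the flattened pair list shared by the two sides
  set ks : List (Int × Int) :=
    (orig.zip abr).flatMap (fun p => p.1.flatMap (fun o => p.2.map (fun a => (o, a)))) with hks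
  -- lay out both grids
  have hgridA := grid_items (PySem.List.pyRange 0 (ma + 1) 1)
      (fun o a => if (PySem.Set.ofList ks).contains (o, a) = true then true else false)
      (PySem.List.nodup_pyRange_one _ _)
      (PySem.List.pyRange 0 (mo + 1) 1) PySem.Dict.empty (PySem.List.nodup_pyRange_one _ _)
      (fun o _ a => PySem.Dict.contains_empty _)
  have hgridB := grid_items (PySem.List.pyRange 0 (ma + 1) 1) (fun _ _ => false)
      (PySem.List.nodup_pyRange_one _ _)
      (PySem.List.pyRange 0 (mo + 1) 1) PySem.Dict.empty (PySem.List.nodup_pyRange_one _ _)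
      (fun o _ a => PySem.Dict.contains_empty _)
  beta_reduce at hgridA hgridB
  -- every valid scattered key is a grid key
  have hcont : ∀ k ∈ ks, 0 ≤ k.1 ∧ 0 ≤ k.2 →
      ((PySem.List.pyRange 0 (mo + 1) 1).foldl (fun d o =>
        (PySem.List.pyRange 0 (ma + 1) 1).foldl (fun d a =>
          d.insert (o, a) false) d) PySem.Dict.empty).contains k = true := by
    intro k hk ⟨hk1, hk2⟩
    have hle1 : k.1 ≤ mo := by
      refine PySem.List.max?_isMax hm1 k.1 ?_
      rcases List.mem_flatMap.mp hk with ⟨p, hp, hkp⟩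
      rcases List.mem_flatMap.mp hkp with ⟨o, ho, hko⟩
      rcases List.mem_map.mp hko with ⟨a, _, hoa⟩
      rcases List.of_mem_zip hp with ⟨hp1, _⟩
      subst hoa
      exact List.mem_flatMap.mpr ⟨p.1, hp1, ho⟩
    have hle2 : k.2 ≤ ma := by
      refine PySem.List.max?_isMax hm2 k.2 ?_
      rcases List.mem_flatMap.mp hk with ⟨p, hp, hkp⟩
      rcases List.mem_flatMap.mp hkp with ⟨o, _, hko⟩
      rcases List.mem_map.mp hko with ⟨a, ha, hoa⟩
      rcases List.of_mem_zip hp with ⟨_, hp2⟩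
      subst hoa
      exact List.mem_flatMap.mpr ⟨p.2, hp2, ha⟩
    rw [PySem.Dict.contains_iff_mem_keys]
    simp only [PySem.Dict.keys]
    rw [hgridB]
    refine List.mem_map.mpr ⟨(k, false), ?_, rfl⟩
    simp only [PySem.Dict.empty, List.nil_append]
    refine List.mem_flatMap.mpr ⟨k.1, ?_, ?_⟩
    · exact PySem.List.mem_pyRange_one.mpr ⟨hk1, by omega⟩
    · exact List.mem_map.mpr ⟨k.2, PySem.List.mem_pyRange_one.mpr ⟨hk2, by omega⟩, rfl⟩
  rw [scatter_flatten, ← hks, scatter_items ks _ hcont]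
  rw [hgridA, hgridB]
  simp only [PySem.Dict.empty, List.nil_append, List.map_flatMap, List.map_map]
  rw [List.flatMap_def, List.flatMap_def]
  apply congrArg List.flatten
  apply List.map_congr_left
  intro o ho
  apply List.map_congr_left
  intro a ha
  have ho0 : 0 ≤ o := (PySem.List.mem_pyRange_one.mp ho).1
  have ha0 : 0 ≤ a := (PySem.List.mem_pyRange_one.mp ha).1
  simp only [Function.comp]
  by_cases hmem : (o, a) ∈ ks
  · simp [hmem, ho0, ha0]
  · simp [hmem]
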